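-- pv_equiv track=rewrite | github.com/JamesJarvis92/NEA | Gamemode3.py | conv_maze
-- ===== SOURCE A (Python) =====
-- def conv_maze(zone_size,maze,player_pos):   ## changes maze to zone around player
--     new_maze = []
--     for i in range(len(maze)):  ## row
--         line = []
--         for j in range(len(maze[i])): ## column
--             if maze[i][j] == "1":
--                 manh_dist = abs(player_pos[0]-j) + abs(player_pos[1]-i)  ## could change to pythagoras
--                 if manh_dist>zone_size:
--                    line.append("0")
--                 else:
--                     line.append("1")
--             elif maze[i][j] == "0":
--                 line.append("0")
--             else:
--                 line.append("2")    ## exit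
--         new_maze.append("".join(line))
--     return new_maze
-- ===== SOURCE B (Python) =====
-- def conv_maze(zone_size, maze, player_pos):
--     px, py = player_pos[0], player_pos[1]
--     # pass 1: base maze with every wall hidden
--     grid = [['0' if c == '0' or c == '1' else '2' for c in row] for row in maze]
--     # pass 2: walk only the diamond |i-py|+|j-px| <= zone_size, restoring original walls
--     for i in range(max(0, py - zone_size), min(len(maze), py + zone_size + 1)):
--         r = zone_size - abs(py - i)
--         row = maze[i]
--         for j in range(max(0, px - r), min(len(row), px + r + 1)):
--             if row[j] == '1':
--                 grid[i][j] = '1'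
--     return [''.join(row) for row in grid]
-- ===== Notes on version B (the rewrite author's own statement) =====
-- stated objective: alternative
-- what changed: B builds a base maze with all walls hidden in one comprehension pass, then a second pass walks only the clamped diamond of radius zone_size around the player restoring original '1' cells, instead of computing a Manhattan distance test at every cell of the maze.
import Mathlib
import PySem

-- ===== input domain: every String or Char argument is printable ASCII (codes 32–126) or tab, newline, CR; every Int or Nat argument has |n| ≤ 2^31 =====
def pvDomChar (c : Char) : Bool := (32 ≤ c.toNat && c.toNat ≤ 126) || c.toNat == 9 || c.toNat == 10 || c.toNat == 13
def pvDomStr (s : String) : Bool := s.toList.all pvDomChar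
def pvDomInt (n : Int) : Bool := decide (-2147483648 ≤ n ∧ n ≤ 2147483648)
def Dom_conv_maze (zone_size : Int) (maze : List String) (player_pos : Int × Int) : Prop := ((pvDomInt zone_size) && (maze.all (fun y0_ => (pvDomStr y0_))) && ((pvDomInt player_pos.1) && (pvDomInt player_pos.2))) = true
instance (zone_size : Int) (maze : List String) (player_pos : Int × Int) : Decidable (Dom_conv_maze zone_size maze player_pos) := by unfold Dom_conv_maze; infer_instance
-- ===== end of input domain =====

-- B replaces A's per-cell Manhattan-distance test by a base pass hiding every wall
-- followed by a second pass over only the clamped diamond around the player that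
-- restores the original '1' cells (alternative decomposition, same exact output).

-- ===== PORT A =====
-- inner loop: for j in range(len(maze[i])), j carried as the Python loop counter
def aRow (zone_size px py i : Int) : Int → List Char → List Char
  | _, [] => []
  | j, c :: cs =>
    (if c = '1' then
      (if ((px - j).natAbs : Int) + ((py - i).natAbs : Int) > zone_size then '0' else '1')
     else if c = '0' then '0' else '2') :: aRow zone_size px py i (j + 1) cs

-- outer loop: for i in range(len(maze)), i carried as the Python loop counter
def aRows (zone_size px py : Int) : Int → List String → List String
  | _, [] => []
  | i, s :: rest =>
      String.mk (aRow zone_size px py i 0 s.toList) :: aRows zone_size px py (i + 1) rest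

def conv_maze (zone_size : Int) (maze : List String) (player_pos : Int × Int) : List String :=
  aRows zone_size player_pos.1 player_pos.2 0 maze

-- ===== PORT B =====
-- base pass: '0' and '1' -> '0', anything else -> '2'
def bBase (c : Char) : Char := if c = '0' ∨ c = '1' then '0' else '2'

-- inner diamond loop: for j in range(a, b): if row[j] == '1': grid[i][j] = '1'
def bInner (row : List Char) (a b : Int) (rw : List Char) : List Char :=
  (PySem.List.pyRange a b 1).foldl
    (fun rw2 j => if (PySem.List.pyGet? row j).getD ' ' = '1' then rw2.set j.toNat '1' else rw2) rw

-- body of the outer loop at row index i: r = zone_size - abs(py - i), row = maze[i],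
-- then the inner loop mutates grid[i] over range(max(0, px - r), min(len(row), px + r + 1))
def bRowFun (zone_size px py : Int) (maze : List String) (i : Int) (rw : List Char) : List Char :=
  bInner ((PySem.List.pyGet? maze i).getD "").toList
    (max 0 (px - (zone_size - ((py - i).natAbs : Int))))
    (min ((((PySem.List.pyGet? maze i).getD "").toList.length : Int))
      (px + (zone_size - ((py - i).natAbs : Int)) + 1)) rw

-- outer diamond loop: for i in range(max(0, py - z), min(len(maze), py + z + 1))
def bOuter (zone_size px py : Int) (maze : List String) (lo hi : Int)
    (g : List (List Char)) : List (List Char) :=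
  (PySem.List.pyRange lo hi 1).foldl
    (fun g2 i => g2.modify i.toNat (bRowFun zone_size px py maze i)) g

def conv_maze_alt (zone_size : Int) (maze : List String) (player_pos : Int × Int) : List String :=
  (bOuter zone_size player_pos.1 player_pos.2 maze (max 0 (player_pos.2 - zone_size))
      (min (maze.length : Int) (player_pos.2 + zone_size + 1))
      (maze.map (fun row => row.toList.map bBase))).map String.mk

-- ===== PRECONDITION & SPEC =====
def Spec_conv_maze (zone_size : Int) (maze : List String) (player_pos : Int × Int) (out : List String) : Prop := out = conv_maze_alt zone_size maze player_pos
instance (zone_size : Int) (maze : List String) (player_pos : Int × Int) (out : List String) : Decidable (Spec_conv_maze zone_size maze player_pos out) := by unfold Spec_conv_maze; infer_instance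

-- ===== CLAIM (what is proved, stated in full; the proofs are below) =====
def Claim_equal_conv_maze : Prop := ∀ (zone_size : Int) (maze : List String) (player_pos : Int × Int), Dom_conv_maze zone_size maze player_pos → Spec_conv_maze zone_size maze player_pos (conv_maze zone_size maze player_pos)

-- ===== LEMMAS AND PROOFS =====

-- the per-cell value A computes at row i, column j
def cell (zone_size px py i j : Int) (c : Char) : Char :=
  if c = '1' then
    (if ((px - j).natAbs : Int) + ((py - i).natAbs : Int) > zone_size then '0' else '1')
  else if c = '0' then '0' else '2'

theorem aRow_getElem? (z px py i : Int) (cs : List Char) (j : Int) (k : Nat)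
    (hk : k < cs.length) :
    (aRow z px py i j cs)[k]? = some (cell z px py i (j + k) cs[k]) := by
  induction cs generalizing j k with
  | nil => simp at hk
  | cons c cs ih =>
    cases k with
    | zero =>
      simp only [aRow, List.getElem?_cons_zero, List.getElem_cons_zero, Nat.cast_zero, add_zero,
        cell]
      rfl
    | succ k =>
      simp only [aRow, List.getElem?_cons_succ, List.getElem_cons_succ]
      rw [ih (j + 1) k (by simpa using hk)]
      congr 2
      push_cast
      ring

theorem aRows_getElem? (z px py : Int) (ms : List String) (i : Int) (k : Nat)
    (hk : k < ms.length) :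
    (aRows z px py i ms)[k]? = some (String.mk (aRow z px py (i + k) 0 (ms[k]).toList)) := by
  induction ms generalizing i k with
  | nil => simp at hk
  | cons s ms ih =>
    cases k with
    | zero =>
      simp only [aRows, List.getElem?_cons_zero, List.getElem_cons_zero, Nat.cast_zero, add_zero]
    | succ k =>
      simp only [aRows, List.getElem?_cons_succ, List.getElem_cons_succ]
      rw [ih (i + 1) k (by simpa using hk)]
      congr 3
      push_cast
      ring

theorem aRows_length (z px py i : Int) (ms : List String) :
    (aRows z px py i ms).length = ms.length := by
  induction ms generalizing i with
  | nil => rfl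
  | cons s ms ih => simp [aRows, ih]

theorem bInner_nil (row : List Char) (a b : Int) (rw : List Char) (h : b ≤ a) :
    bInner row a b rw = rw := by
  unfold bInner
  rw [PySem.List.pyRange_one_eq_nil h]
  rfl

theorem bInner_cons (row : List Char) (a b : Int) (rw : List Char) (h : a < b) :
    bInner row a b rw = bInner row (a + 1) b
      (if (PySem.List.pyGet? row a).getD ' ' = '1' then rw.set a.toNat '1' else rw) := by
  unfold bInner
  rw [PySem.List.pyRange_one_cons h, List.foldl_cons]

theorem bInner_length (row : List Char) (a b : Int) (rw : List Char) :
    (bInner row a b rw).length = rw.length := by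
  unfold bInner
  induction PySem.List.pyRange a b 1 generalizing rw with
  | nil => rfl
  | cons j js ih =>
    rw [List.foldl_cons, ih]
    split <;> simp

theorem bInner_getElem? (row : List Char) : ∀ (n : Nat) (a b : Int), (b - a).toNat = n → 0 ≤ a →
    ∀ (rw : List Char) (m : Nat) (hm : m < rw.length),
    (bInner row a b rw)[m]?
      = some (if a ≤ (m : Int) ∧ (m : Int) < b ∧ (PySem.List.pyGet? row (m : Int)).getD ' ' = '1'
        then '1' else rw[m]) := by
  intro n
  induction n with
  | zero =>
    intro a b hn ha rw m hm
    have hba : b ≤ a := by omega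
    rw [bInner_nil row a b rw hba, List.getElem?_eq_getElem hm, if_neg]
    rintro ⟨h1, h2, _⟩; omega
  | succ n ih =>
    intro a b hn ha rw m hm
    have hab : a < b := by omega
    rw [bInner_cons row a b rw hab]
    by_cases hPa : (PySem.List.pyGet? row a).getD ' ' = '1'
    · rw [if_pos hPa, ih (a + 1) b (by omega) (by omega) (rw.set a.toNat '1') m (by simpa using hm)]
      refine congrArg some ?_
      rw [List.getElem_set]
      by_cases hma : (m : Int) = a
      · have hta : a.toNat = m := by omega
        rw [if_pos hta, if_neg (by rintro ⟨h1, _, _⟩; omega),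
          if_pos ⟨by omega, by omega, by rwa [hma]⟩]
      · rw [if_neg (by omega : ¬ a.toNat = m)]
        exact if_congr (by constructor <;> (rintro ⟨h1, h2, h3⟩; exact ⟨by omega, h2, h3⟩)) rfl rfl
    · rw [if_neg hPa, ih (a + 1) b (by omega) (by omega) rw m hm]
      refine congrArg some ?_
      by_cases hma : (m : Int) = a
      · rw [if_neg (by rintro ⟨h1, _, _⟩; omega),
          if_neg (by rintro ⟨_, _, h3⟩; rw [hma] at h3; exact hPa h3)]
      · exact if_congr (by constructor <;> (rintro ⟨h1, h2, h3⟩; exact ⟨by omega, h2, h3⟩)) rfl rfl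

theorem bOuter_nil (z px py : Int) (maze : List String) (lo hi : Int) (g : List (List Char))
    (h : hi ≤ lo) : bOuter z px py maze lo hi g = g := by
  unfold bOuter
  rw [PySem.List.pyRange_one_eq_nil h]
  rfl

theorem bOuter_cons (z px py : Int) (maze : List String) (lo hi : Int) (g : List (List Char))
    (h : lo < hi) : bOuter z px py maze lo hi g
      = bOuter z px py maze (lo + 1) hi (g.modify lo.toNat (bRowFun z px py maze lo)) := by
  unfold bOuter
  rw [PySem.List.pyRange_one_cons h, List.foldl_cons]

theorem bOuter_length (z px py : Int) (maze : List String) (lo hi : Int) (g : List (List Char)) :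
    (bOuter z px py maze lo hi g).length = g.length := by
  unfold bOuter
  induction PySem.List.pyRange lo hi 1 generalizing g with
  | nil => rfl
  | cons i is ih => rw [List.foldl_cons, ih]; simp

theorem bOuter_getElem? (z px py : Int) (maze : List String) : ∀ (n : Nat) (lo hi : Int),
    (hi - lo).toNat = n → 0 ≤ lo →
    ∀ (g : List (List Char)) (k : Nat) (hk : k < g.length),
    (bOuter z px py maze lo hi g)[k]?
      = some (if lo ≤ (k : Int) ∧ (k : Int) < hi then bRowFun z px py maze k g[k] else g[k]) := by
  intro n
  induction n with
  | zero =>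
    intro lo hi hn hlo g k hk
    have hle : hi ≤ lo := by omega
    rw [bOuter_nil z px py maze lo hi g hle, List.getElem?_eq_getElem hk, if_neg]
    rintro ⟨h1, h2⟩; omega
  | succ n ih =>
    intro lo hi hn hlo g k hk
    have hab : lo < hi := by omega
    rw [bOuter_cons z px py maze lo hi g hab,
      ih (lo + 1) hi (by omega) (by omega) (g.modify lo.toNat (bRowFun z px py maze lo)) k
        (by simpa using hk)]
    refine congrArg some ?_
    rw [List.getElem_modify]
    by_cases hkl : (k : Int) = lo
    · have hta : lo.toNat = k := by omega
      rw [if_pos hta, if_neg (by rintro ⟨h1, _⟩; omega), if_pos ⟨by omega, by omega⟩, hkl]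
    · rw [if_neg (by omega : ¬ lo.toNat = k)]
      exact if_congr (by constructor <;> (rintro ⟨h1, h2⟩; exact ⟨by omega, h2⟩)) rfl rfl

-- per-cell agreement inside the diamond rows
theorem cell_eq_in (z px py : Int) (k m rlen : Nat) (hm : m < rlen) (c : Char) :
    (if max 0 (px - (z - ((py - (k : Int)).natAbs : Int))) ≤ (m : Int)
        ∧ (m : Int) < min (rlen : Int) (px + (z - ((py - (k : Int)).natAbs : Int)) + 1)
        ∧ c = '1'
     then '1' else bBase c) = cell z px py k m c := by
  by_cases h1 : c = '1'
  · subst h1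
    have hiff : (max 0 (px - (z - ((py - (k : Int)).natAbs : Int))) ≤ (m : Int)
        ∧ (m : Int) < min ((rlen : Int)) (px + (z - ((py - (k : Int)).natAbs : Int)) + 1)
        ∧ ('1' : Char) = '1')
        ↔ ¬ (((px - (m : Int)).natAbs : Int) + ((py - (k : Int)).natAbs : Int) > z) := by
      constructor
      · rintro ⟨ha, hb, -⟩; omega
      · intro h; exact ⟨by omega, by omega, rfl⟩
    unfold cell bBase
    rw [if_pos (rfl : ('1' : Char) = '1')]
    by_cases h2 : ((px - (m : Int)).natAbs : Int) + ((py - (k : Int)).natAbs : Int) > z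
    · rw [if_pos h2, if_neg (by rw [hiff]; exact not_not_intro h2), if_pos (Or.inr rfl)]
    · rw [if_neg h2, if_pos (hiff.mpr h2)]
  · unfold cell bBase
    rw [if_neg (fun hA => h1 hA.2.2), if_neg h1]
    by_cases h0 : c = '0'
    · subst h0; rw [if_pos (Or.inl rfl), if_pos rfl]
    · rw [if_neg (by rintro (h | h); exacts [h0 h, h1 h]), if_neg h0]

-- per-cell agreement outside the diamond rows: the whole row is further than zone_size
theorem cell_eq_out (z px py : Int) (k m : Nat)
    (hk : ¬ (max 0 (py - z) ≤ (k : Int) ∧ (k : Int) < py + z + 1)) (c : Char) :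
    bBase c = cell z px py k m c := by
  unfold cell bBase
  by_cases h1 : c = '1'
  · subst h1
    rw [if_pos (Or.inr rfl), if_pos (rfl : ('1' : Char) = '1'), if_pos (by omega)]
  · rw [if_neg h1]
    by_cases h0 : c = '0'
    · subst h0; rw [if_pos (Or.inl rfl), if_pos rfl]
    · rw [if_neg (by rintro (h | h); exacts [h0 h, h1 h]), if_neg h0]

theorem row_eq (z px py : Int) (maze : List String) (k : Nat) (hk : k < maze.length) :
    aRow z px py k 0 (maze[k]).toList
      = (if max 0 (py - z) ≤ (k : Int) ∧ (k : Int) < min (maze.length : Int) (py + z + 1)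
         then bRowFun z px py maze k ((maze[k]).toList.map bBase)
         else (maze[k]).toList.map bBase) := by
  have hrow : ((PySem.List.pyGet? maze (k : Int)).getD "").toList = (maze[k]).toList := by
    rw [PySem.List.pyGet?_natCast, List.getElem?_eq_getElem hk]
    rfl
  apply List.ext_getElem?
  intro m
  by_cases hm : m < (maze[k]).toList.length
  · rw [aRow_getElem? z px py (k : Int) (maze[k]).toList 0 m hm]
    by_cases hd : max 0 (py - z) ≤ (k : Int) ∧ (k : Int) < min (maze.length : Int) (py + z + 1)
    · rw [if_pos hd]
      unfold bRowFun
      simp only [hrow]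
      rw [bInner_getElem? (maze[k]).toList _ _ _ rfl (by omega)
        ((maze[k]).toList.map bBase) m (by simpa using hm)]
      have hcm : (PySem.List.pyGet? (maze[k]).toList (m : Int)).getD ' '
          = (maze[k]).toList[m] := by
        rw [PySem.List.pyGet?_natCast, List.getElem?_eq_getElem hm]
        rfl
      have hbm : ((maze[k]).toList.map bBase)[m]'(by simpa using hm)
          = bBase ((maze[k]).toList[m]) := by simp
      rw [hcm, hbm, zero_add]
      exact congrArg some
        (cell_eq_in z px py k m (maze[k]).toList.length hm ((maze[k]).toList[m])).symm
    · rw [if_neg hd, List.getElem?_map, List.getElem?_eq_getElem hm, zero_add]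
      have hout : ¬ (max 0 (py - z) ≤ (k : Int) ∧ (k : Int) < py + z + 1) := by
        intro h; exact hd ⟨h.1, by omega⟩
      exact congrArg some (cell_eq_out z px py k m hout ((maze[k]).toList[m])).symm
  · have h1 : (aRow z px py (k : Int) 0 (maze[k]).toList).length ≤ m := by
      have : ∀ (j : Int) (cs : List Char), (aRow z px py (k : Int) j cs).length = cs.length := by
        intro j cs
        induction cs generalizing j with
        | nil => rfl
        | cons c cs ih => simp [aRow, ih]
      rw [this]; omega
    have h2 : ((maze[k]).toList.map bBase).length ≤ m := by rw [List.length_map]; omega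
    rw [List.getElem?_eq_none h1]
    split
    · rw [List.getElem?_eq_none (by unfold bRowFun; rw [bInner_length]; simpa using h2)]
    · rw [List.getElem?_eq_none h2]

-- ===== VERDICT (by name: the statement is the Claim_ definition above) =====
theorem conv_maze_spec : Claim_equal_conv_maze := by
  intro z maze pp _
  show conv_maze z maze pp = conv_maze_alt z maze pp
  obtain ⟨px, py⟩ := pp
  unfold conv_maze conv_maze_alt
  apply List.ext_getElem?
  intro k
  by_cases hk : k < maze.length
  · rw [aRows_getElem? z px py maze 0 k hk, List.getElem?_map,
      bOuter_getElem? z px py maze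
        ((min (maze.length : Int) (py + z + 1)) - max 0 (py - z)).toNat
        (max 0 (py - z)) (min (maze.length : Int) (py + z + 1)) rfl (by omega)
        (maze.map (fun row => row.toList.map bBase)) k (by simpa using hk)]
    have hbase : (maze.map (fun row => row.toList.map bBase))[k]'(by simpa using hk)
        = (maze[k]).toList.map bBase := by simp
    rw [hbase, Option.map_some, zero_add]
    exact congrArg some (congrArg String.mk (row_eq z px py maze k hk))
  · rw [List.getElem?_eq_none (by rw [aRows_length]; omega),
      List.getElem?_eq_none (by rw [List.length_map, bOuter_length]; simp; omega)]
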